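-- pv_equiv track=rewrite | github.com/faychu/HNE | preprocess/filter_records.py | get_paper_counter
-- ===== SOURCE A (Python) =====
-- from collections import Counter
--
-- def get_paper_counter(data):
--     paper_list = []
--     one_paper_list = []
--     for i in data:
--         paper_list.append(i['title'])
--     c = Counter(paper_list)
--     for i in c:
--         if c[i] ==1:
--             one_paper_list.append(i)
--     return one_paper_list
-- ===== SOURCE B (Python) =====
-- def get_paper_counter(data):
--     titles = [i['title'] for i in data]
--     return [t for t in titles if titles.count(t) == 1]
-- ===== Notes on version B (the rewrite author's own statement) =====
-- stated objective: simpler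
-- what changed: Replaced the Counter build plus scan over the counter's keys with a direct brute-force comprehension: keep each extracted title whose occurrence count in the title list (computed by list.count, a rescan per element) is exactly one; no counting table or set is ever built.
-- outside the precondition, e.g. on get_paper_counter([{}]): A raises KeyError, B raises KeyError
import Mathlib
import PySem

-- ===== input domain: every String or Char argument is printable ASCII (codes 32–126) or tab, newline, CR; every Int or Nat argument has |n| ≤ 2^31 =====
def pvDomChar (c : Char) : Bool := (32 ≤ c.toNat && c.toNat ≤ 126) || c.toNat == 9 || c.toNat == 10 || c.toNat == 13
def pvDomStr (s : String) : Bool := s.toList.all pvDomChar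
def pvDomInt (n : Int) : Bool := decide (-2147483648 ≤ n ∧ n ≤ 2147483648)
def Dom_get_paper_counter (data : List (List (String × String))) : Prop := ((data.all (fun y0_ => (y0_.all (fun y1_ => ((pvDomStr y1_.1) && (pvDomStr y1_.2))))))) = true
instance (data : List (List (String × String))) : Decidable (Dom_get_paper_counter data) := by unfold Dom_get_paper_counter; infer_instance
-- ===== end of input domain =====

-- B drops the Counter entirely: it keeps each title whose list.count in the title list is exactly 1; objective: simpler (B is O(n^2) vs A's O(n)).

-- ===== PORT A =====
-- shared helper: i['title'] on the record dict (total under Pre_, which guarantees the key)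
def pvTitle (i : List (String × String)) : String := (PySem.Dict.ofList i).getD "title" ""

def get_paper_counter (data : List (List (String × String))) : List String :=
  let paper_list := data.foldl (fun acc i => acc ++ [pvTitle i]) []
  let c := PySem.Dict.counter paper_list
  c.keys.foldl (fun acc i => if c.getD i 0 == 1 then acc ++ [i] else acc) []

-- ===== PORT B =====
def get_paper_counter_alt (data : List (List (String × String))) : List String :=
  let titles := data.map pvTitle
  titles.filter (fun t => PySem.List.count titles t == 1)

-- ===== PRECONDITION & SPEC =====
-- Pre_ excludes exactly the records without a 'title' key, on which Python A raises KeyError.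
def Pre_get_paper_counter (data : List (List (String × String))) : Prop :=
  (data.all (fun i => (PySem.Dict.ofList i).contains "title")) = true
instance (data : List (List (String × String))) : Decidable (Pre_get_paper_counter data) := by unfold Pre_get_paper_counter; infer_instance

def pvWitness_get_paper_counter : (List (List (String × String))) :=
  [[("title", "a"), ("year", "2020")], [("title", "b")], [("title", "a")]]

def Spec_get_paper_counter (data : List (List (String × String))) (out : List String) : Prop := out = get_paper_counter_alt data
instance (data : List (List (String × String))) (out : List String) : Decidable (Spec_get_paper_counter data out) := by unfold Spec_get_paper_counter; infer_instance

-- ===== CLAIM (what is proved, stated in full; the proofs are below) =====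
def Claim_equal_get_paper_counter : Prop := ∀ (data : List (List (String × String))), Dom_get_paper_counter data → Pre_get_paper_counter data → Spec_get_paper_counter data (get_paper_counter data)

-- ===== LEMMAS AND PROOFS =====

-- Filtering the first-occurrence dedup (Set.ofList, built by foldl add over an accumulator s)
-- by a predicate that only holds on elements occurring at most once equals filtering the raw list.
theorem pv_filter_ofList_aux (p : String → Bool) :
    ∀ (rest : List String) (s : List String),
      (∀ x, p x = true → x ∈ s → x ∉ rest) →
      (∀ x, p x = true → rest.count x ≤ 1) →
      (rest.foldl PySem.Set.add s).filter p = s.filter p ++ rest.filter p := by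
  intro rest
  induction rest with
  | nil => intro s _ _; simp
  | cons t rest ih =>
    intro s hdisj hcnt
    simp only [List.foldl_cons]
    by_cases hts : t ∈ s
    · have hadd : PySem.Set.add s t = s := by simp [PySem.Set.add, hts]
      have hpt : p t = false := by
        rcases h : p t with _ | _
        · rfl
        · exact absurd List.mem_cons_self (hdisj t h hts)
      rw [hadd, ih s
        (fun x hx hxs hxr => hdisj x hx hxs (List.mem_cons_of_mem _ hxr))
        (fun x hx => le_trans (List.count_le_count_cons ..) (hcnt x hx))]
      simp [hpt]
    · have hadd : PySem.Set.add s t = s ++ [t] := by simp [PySem.Set.add, hts]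
      rw [hadd, ih (s ++ [t])]
      · rw [List.filter_append]
        by_cases hpt : p t = true <;> simp [hpt]
      · intro x hx hxmem hxr
        rcases List.mem_append.mp hxmem with hxs | hxt
        · exact hdisj x hx hxs (List.mem_cons_of_mem _ hxr)
        · have hxeq : x = t := by simpa using hxt
          subst hxeq
          have h0 := hcnt x hx
          have h1 : 1 ≤ rest.count x := List.count_pos_iff.mpr hxr
          rw [List.count_cons_self] at h0
          omega
      · intro x hx
        have := hcnt x hx
        have : rest.count x ≤ (t :: rest).count x := List.count_le_count_cons ..
        omega

theorem pv_main (data : List (List (String × String))) :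
    get_paper_counter data = get_paper_counter_alt data := by
  simp only [get_paper_counter, get_paper_counter_alt]
  rw [PySem.List.foldl_append_singleton_eq_map, List.nil_append]
  set ts := data.map pvTitle with hts
  rw [PySem.List.foldl_append_if (fun i => (PySem.Dict.counter ts).getD i 0 == 1) (fun i => i)]
  rw [List.nil_append, List.map_id', PySem.Dict.keys_counter]
  have hof : PySem.Set.ofList ts = ts.foldl PySem.Set.add [] := PySem.Set.ofList_eq_foldl ts
  have hfilter : (ts.foldl PySem.Set.add []).filter (fun i => (PySem.Dict.counter ts).getD i 0 == 1)
      = ts.filter (fun i => (PySem.Dict.counter ts).getD i 0 == 1) := by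
    have := pv_filter_ofList_aux (fun i => (PySem.Dict.counter ts).getD i 0 == 1) ts []
      (by intro x _ hxs; simp at hxs)
      (by
        intro x hx
        simp only [PySem.Dict.getD_counter] at hx
        have : (ts.count x : Int) = 1 := by
          have := of_decide_eq_true (by simpa [beq_iff_eq] using hx)
          exact_mod_cast this
        omega)
    simpa using this
  rw [hof, hfilter]
  apply List.filter_congr
  intro x _
  simp [PySem.Dict.getD_counter, PySem.List.count]

-- ===== VERDICT (by name: the statement is the Claim_ definition above) =====
theorem get_paper_counter_spec : Claim_equal_get_paper_counter := by
  intro data _ _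
  unfold Spec_get_paper_counter
  exact pv_main data
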